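-- pv_equiv track=rewrite | github.com/memphis242/advent-of-code-2023 | day6/python/aoc-day6.py | get_mapping_triple
-- ===== SOURCE A (Python) =====
-- from typing import Tuple, List
--
-- def get_mapping_triple( line: str ) -> Tuple[int, int, int]:
--    num_list = []
--    loop_skip_counter = 0
--    for char_idx, char in enumerate(line):
--       # skip over characters if applicable
--       if loop_skip_counter > 0:
--          loop_skip_counter -= 1
--          continue
--
--       # skip over non-digits and increment chars to skip
--       if not char.isdigit():
--          continue
--
--       # iterate through digits until non-digit is found
--       num_str = char
--       check_idx = char_idx + 1
--       if check_idx <= len(line)-1: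
--          check_char = line[check_idx]
--       else:
--          check_char = ''
--       while check_char.isdigit():
--          num_str = num_str + check_char
--          check_idx = check_idx + 1
--          if check_idx <= len(line)-1:
--             check_char = line[check_idx]
--          else:
--             break
--
--       # num found, assign to triple
--       loop_skip_counter = len(num_str) - 1
--       num_list.append(int(num_str))
--       # check if we've filled up the triple already
--       if len(num_list) >= 3:
--          break
--
--    return ( num_list[0], num_list[1], num_list[2] )
-- ===== SOURCE B (Python) =====
-- def get_mapping_triple(line):
--     nums = []
--     cur = ""
--     for ch in line:
--         if ch.isdigit():
--             cur += ch
--         elif cur: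
--             nums.append(int(cur))
--             cur = ""
--     if cur:
--         nums.append(int(cur))
--     return (nums[0], nums[1], nums[2])
-- ===== Notes on version B (the rewrite author's own statement) =====
-- stated objective: simpler
-- what changed: B replaces A's index-juggling scan (enumerate + skip-counter + nested while re-reading the line by index + early break) with a single linear pass over the characters that accumulates the current digit run and flushes it on each non-digit, then indexes the first three numbers.
import Mathlib
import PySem

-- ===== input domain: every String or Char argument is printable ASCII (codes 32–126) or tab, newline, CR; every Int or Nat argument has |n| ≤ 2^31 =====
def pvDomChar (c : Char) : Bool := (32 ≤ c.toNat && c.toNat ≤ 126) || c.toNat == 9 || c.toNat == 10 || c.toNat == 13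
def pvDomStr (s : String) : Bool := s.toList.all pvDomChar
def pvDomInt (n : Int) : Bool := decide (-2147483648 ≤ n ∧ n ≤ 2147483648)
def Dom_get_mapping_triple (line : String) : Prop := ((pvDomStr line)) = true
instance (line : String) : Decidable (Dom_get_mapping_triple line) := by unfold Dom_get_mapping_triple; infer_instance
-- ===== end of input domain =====

-- B replaces A's skip-counter + nested-while index scan by one linear pass that
-- accumulates the current digit run and flushes it at each non-digit (objective: simpler).

-- int(numStr) where numStr is always a nonempty run of digits, so ofChars? is some;
-- the getD 0 default is never reached.
def pvInt (cs : List Char) : Int := (PySem.Int.ofChars? cs).getD 0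

-- ===== PORT A =====
-- A's inner `while check_char.isdigit():` loop; the dite is Python's bound check
-- `check_idx <= len(line)-1` (out of range reads check_char = '', which is not a digit).
def pvInner (s : List Char) (checkIdx : Nat) (numStr : List Char) : List Char :=
  if h : checkIdx < s.length then
    if PySem.Chars.isdigit s[checkIdx] then pvInner s (checkIdx + 1) (numStr ++ [s[checkIdx]])
    else numStr
  else numStr
termination_by s.length - checkIdx

-- A's `for char_idx, char in enumerate(line)` with the skip counter and the break at 3
def pvOuter (s : List Char) (idx : Nat) (numList : List Int) (skip : Nat) : List Int :=
  if hlt : idx < s.length then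
    if skip > 0 then pvOuter s (idx + 1) numList (skip - 1)
    else if !(PySem.Chars.isdigit s[idx]) then pvOuter s (idx + 1) numList skip
    else
      let numStr := pvInner s (idx + 1) [s[idx]]
      let numList' := numList ++ [pvInt numStr]
      if 3 ≤ numList'.length then numList'
      else pvOuter s (idx + 1) numList' (numStr.length - 1)
  else numList
termination_by s.length - idx

-- num_list[i] raises IndexError when fewer than 3 numbers were found: pyGet? = none
-- there, excluded by Pre_; the getD 0 default is never reached inside Pre_.
def get_mapping_triple (line : String) : Int × Int × Int :=
  let nl := pvOuter line.toList 0 [] 0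
  ((PySem.List.pyGet? nl 0).getD 0, (PySem.List.pyGet? nl 1).getD 0, (PySem.List.pyGet? nl 2).getD 0)

-- ===== PORT B =====
-- B's single pass: accumulate the current digit run `cur`, flush it on a non-digit / at the end
def pvBLoop (cs : List Char) (nums : List Int) (cur : List Char) : List Int :=
  match cs with
  | [] => if cur.isEmpty then nums else nums ++ [pvInt cur]
  | c :: rest =>
      if PySem.Chars.isdigit c then pvBLoop rest nums (cur ++ [c])
      else if cur.isEmpty then pvBLoop rest nums []
      else pvBLoop rest (nums ++ [pvInt cur]) []

def get_mapping_triple_alt (line : String) : Int × Int × Int :=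
  let nums := pvBLoop line.toList [] []
  ((PySem.List.pyGet? nums 0).getD 0, (PySem.List.pyGet? nums 1).getD 0,
   (PySem.List.pyGet? nums 2).getD 0)

-- ===== PRECONDITION & SPEC =====
-- Pre_ excludes exactly the lines with fewer than three maximal digit runs — i.e. fewer
-- than three positions holding a digit not preceded by a digit — on which A (and B)
-- raise IndexError at num_list[...].
def Pre_get_mapping_triple (line : String) : Prop :=
  3 ≤ (line.toList.zip (false :: line.toList.map PySem.Chars.isdigit)).countP
        (fun p => PySem.Chars.isdigit p.1 && !p.2)
instance (line : String) : Decidable (Pre_get_mapping_triple line) := by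
  unfold Pre_get_mapping_triple; infer_instance

def pvWitness_get_mapping_triple : String := "12 ab 3 and 456."

def Spec_get_mapping_triple (line : String) (out : Int × Int × Int) : Prop := out = get_mapping_triple_alt line
instance (line : String) (out : Int × Int × Int) : Decidable (Spec_get_mapping_triple line out) := by unfold Spec_get_mapping_triple; infer_instance

-- ===== CLAIM (what is proved, stated in full; the proofs are below) =====
def Claim_equal_get_mapping_triple : Prop := ∀ (line : String), Dom_get_mapping_triple line → Pre_get_mapping_triple line → Spec_get_mapping_triple line (get_mapping_triple line)

-- ===== LEMMAS AND PROOFS =====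

-- proof helper: the maximal digit runs of cs, with a pending run `cur`
def pvRuns (cur : List Char) (cs : List Char) : List (List Char) :=
  match cs with
  | [] => if cur.isEmpty then [] else [cur]
  | c :: rest =>
      if PySem.Chars.isdigit c then pvRuns (cur ++ [c]) rest
      else if cur.isEmpty then pvRuns [] rest
      else cur :: pvRuns [] rest

-- the number of runs is the number of digit positions not preceded by a digit
theorem pvRuns_length (cs : List Char) : ∀ cur : List Char,
    (pvRuns cur cs).length =
      (cs.zip ((!cur.isEmpty) :: cs.map PySem.Chars.isdigit)).countP
          (fun p => PySem.Chars.isdigit p.1 && !p.2) +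
        (if cur.isEmpty then 0 else 1) := by
  induction cs with
  | nil => intro cur; by_cases h : cur.isEmpty <;> simp [pvRuns, h]
  | cons c rest ih =>
    intro cur
    have hne : (cur ++ [c]).isEmpty = false := by simp
    by_cases hd : PySem.Chars.isdigit c <;> by_cases h : cur.isEmpty <;>
      simp [pvRuns, hd, h, hne, List.zip_cons_cons, ih]

theorem pvRuns_cons_of_ne (cur : List Char) (cs : List Char) (h : cur.isEmpty = false) :
    pvRuns cur cs =
      (cur ++ cs.takeWhile PySem.Chars.isdigit) ::
        pvRuns [] (cs.dropWhile PySem.Chars.isdigit) := by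
  induction cs generalizing cur with
  | nil => simp [pvRuns, h]
  | cons c rest ih =>
    by_cases hd : PySem.Chars.isdigit c
    · have hne : (cur ++ [c]).isEmpty = false := by simp
      simp [pvRuns, hd, ih (cur ++ [c]) hne]
    · simp [pvRuns, hd, h]

theorem pvBLoop_eq (cs : List Char) (nums : List Int) (cur : List Char) :
    pvBLoop cs nums cur = nums ++ (pvRuns cur cs).map pvInt := by
  induction cs generalizing nums cur with
  | nil =>
    by_cases h : cur.isEmpty <;> simp [pvBLoop, pvRuns, h]
  | cons c rest ih =>
    by_cases hd : PySem.Chars.isdigit c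
    · simp [pvBLoop, pvRuns, hd, ih]
    · by_cases h : cur.isEmpty
      · simp [pvBLoop, pvRuns, hd, h, ih]
      · simp [pvBLoop, pvRuns, hd, h, ih]

theorem pvInner_eq (s : List Char) (j : Nat) (acc : List Char) :
    pvInner s j acc = acc ++ (s.drop j).takeWhile PySem.Chars.isdigit := by
  rw [pvInner]
  by_cases h : j < s.length
  · rw [dif_pos h, List.drop_eq_getElem_cons h, List.takeWhile_cons]
    by_cases hd : PySem.Chars.isdigit s[j]
    · simp only [hd, if_true]
      rw [pvInner_eq s (j + 1) (acc ++ [s[j]])]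
      simp
    · simp [hd]
  · rw [dif_neg h, List.drop_eq_nil_of_le (by omega)]
    simp
termination_by s.length - j

theorem pvOuter_skip (s : List Char) (k : Nat) :
    ∀ idx nl, pvOuter s idx nl k = pvOuter s (idx + k) nl 0 := by
  induction k with
  | zero => intro idx nl; rfl
  | succ k ih =>
    intro idx nl
    rw [pvOuter]
    by_cases hlt : idx < s.length
    · rw [dif_pos hlt]
      simp only [show k + 1 > 0 by omega, if_true, Nat.add_sub_cancel]
      rw [ih (idx + 1) nl, show idx + 1 + k = idx + (k + 1) by omega]
    · rw [dif_neg hlt, pvOuter, dif_neg (by omega : ¬ idx + (k + 1) < s.length)]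

theorem pvOuter_eq (s : List Char) : ∀ idx nl, nl.length < 3 →
    pvOuter s idx nl 0 =
      (nl ++ (pvRuns [] (s.drop idx)).map pvInt).take 3 := by
  intro idx nl hnl
  rw [pvOuter]
  by_cases hj : idx < s.length
  · rw [dif_pos hj]
    have hdrop : s.drop idx = s[idx] :: s.drop (idx + 1) :=
      List.drop_eq_getElem_cons hj
    set rest := s.drop (idx + 1) with hrest
    by_cases hd : PySem.Chars.isdigit s[idx]
    · simp only [hd, Bool.not_true, Bool.false_eq_true, if_false, Nat.lt_irrefl, gt_iff_lt]
      have hinner : pvInner s (idx + 1) [s[idx]] =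
          [s[idx]] ++ rest.takeWhile PySem.Chars.isdigit := pvInner_eq s (idx + 1) _
      have hruns : pvRuns [] (s.drop idx) =
          ([s[idx]] ++ rest.takeWhile PySem.Chars.isdigit) ::
            pvRuns [] (rest.dropWhile PySem.Chars.isdigit) := by
        rw [hdrop]
        show pvRuns [] (s[idx] :: rest) = _
        rw [pvRuns]
        simp only [hd, if_true, List.nil_append]
        exact pvRuns_cons_of_ne [s[idx]] rest (by simp)
      by_cases h3 : 3 ≤ (nl ++ [pvInt (pvInner s (idx + 1) [s[idx]])]).length
      · simp only [h3, if_true]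
        have h3' : 3 ≤ (nl ++ [pvInt (pvInner s (idx + 1) [s[idx]])]).length := h3
        rw [hruns, hinner]
        simp only [List.map_cons]
        rw [show nl ++ pvInt ([s[idx]] ++ rest.takeWhile PySem.Chars.isdigit) ::
              (pvRuns [] (rest.dropWhile PySem.Chars.isdigit)).map pvInt =
            (nl ++ [pvInt ([s[idx]] ++ rest.takeWhile PySem.Chars.isdigit)]) ++
              (pvRuns [] (rest.dropWhile PySem.Chars.isdigit)).map pvInt by simp]
        rw [hinner] at h3'
        rw [List.take_append_of_le_length (by simpa using (by simpa using h3' : 3 ≤ nl.length + 1))]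
        rw [List.take_of_length_le (by simp; omega)]
      · simp only [h3, if_false]
        have hlt : (nl ++ [pvInt (pvInner s (idx + 1) [s[idx]])]).length < 3 := by omega
        rw [pvOuter_skip s _ _ _]
        have hlen1 : (pvInner s (idx + 1) [s[idx]]).length - 1 =
            (rest.takeWhile PySem.Chars.isdigit).length := by
          rw [hinner]; simp
        rw [hlen1]
        rw [pvOuter_eq s (idx + 1 + (rest.takeWhile PySem.Chars.isdigit).length) _ hlt]
        have hdrop2 : s.drop (idx + 1 + (rest.takeWhile PySem.Chars.isdigit).length) =
            rest.dropWhile PySem.Chars.isdigit := by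
          rw [← List.drop_drop, ← hrest,
            show List.drop (rest.takeWhile PySem.Chars.isdigit).length rest =
                List.drop (rest.takeWhile PySem.Chars.isdigit).length
                  (rest.takeWhile PySem.Chars.isdigit ++ rest.dropWhile PySem.Chars.isdigit) from by
              rw [List.takeWhile_append_dropWhile],
            List.drop_left]
        rw [hdrop2, hruns, hinner]
        simp
    · simp only [hd, Bool.not_false, if_true, Nat.lt_irrefl, if_false, gt_iff_lt]
      rw [pvOuter_eq s (idx + 1) nl hnl, hdrop]
      show _ = (nl ++ (pvRuns [] (s[idx] :: rest)).map pvInt).take 3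
      rw [pvRuns]
      simp only [hd, Bool.false_eq_true, if_false, List.isEmpty_nil, if_true]
      rw [hrest]
  · rw [dif_neg hj, List.drop_eq_nil_of_le (by omega)]
    simp [pvRuns, List.take_of_length_le (by omega : nl.length ≤ 3)]
termination_by idx => s.length - idx
decreasing_by all_goals omega

-- ===== VERDICT (by name: the statement is the Claim_ definition above) =====
theorem get_mapping_triple_spec : Claim_equal_get_mapping_triple := by
  intro s _ hpre
  unfold Spec_get_mapping_triple
  simp only [get_mapping_triple, get_mapping_triple_alt]
  have hB : pvBLoop s.toList [] [] = (pvRuns [] s.toList).map pvInt :=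
    pvBLoop_eq s.toList [] []
  have hA : pvOuter s.toList 0 [] 0 = ((pvRuns [] s.toList).map pvInt).take 3 := by
    simpa using pvOuter_eq s.toList 0 [] (by simp)
  have hlen : 3 ≤ ((pvRuns [] s.toList).map pvInt).length := by
    rw [List.length_map, pvRuns_length s.toList []]
    unfold Pre_get_mapping_triple at hpre
    simpa using hpre
  rw [hA, hB]
  set R := (pvRuns [] s.toList).map pvInt with hR
  have hget : ∀ i : Nat, i < 3 →
      PySem.List.pyGet? (R.take 3) (i : Int) = PySem.List.pyGet? R (i : Int) := by
    intro i hi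
    rw [PySem.List.pyGet?_natCast, PySem.List.pyGet?_natCast,
      List.getElem?_take_of_lt hi]
  have h0 := hget 0 (by omega)
  have h1 := hget 1 (by omega)
  have h2 := hget 2 (by omega)
  simp only [Nat.cast_ofNat, Nat.cast_one, Nat.cast_zero] at h0 h1 h2
  rw [h0, h1, h2]
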